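-- pv_equiv track=rewrite | github.com/lloxis/ds_info_annale_1 | main.py | totaux_semaine
-- ===== SOURCE A (Python) =====
-- def totaux_semaine(liste):
--     liste_totaux_semaines = []
--     total_semaine = 0
--     for i in range(len(liste)):
--         total_semaine += liste[i]
--         if i%7 == 6:
--             liste_totaux_semaines.append(total_semaine)
--             total_semaine = 0
--     return liste_totaux_semaines
-- ===== SOURCE B (Python) =====
-- def totaux_semaine(liste):
--     n = len(liste) // 7
--     return [sum(liste[7 * w:7 * w + 7]) for w in range(n)]
-- ===== Notes on version B (the rewrite author's own statement) =====
-- stated objective: simpler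
-- what changed: Replaced the element-by-element loop with a running accumulator and i%7==6 reset by a one-line comprehension over complete weeks, summing each full 7-element slice; the trailing partial week is dropped by len//7 exactly as A drops it.
import Mathlib
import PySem

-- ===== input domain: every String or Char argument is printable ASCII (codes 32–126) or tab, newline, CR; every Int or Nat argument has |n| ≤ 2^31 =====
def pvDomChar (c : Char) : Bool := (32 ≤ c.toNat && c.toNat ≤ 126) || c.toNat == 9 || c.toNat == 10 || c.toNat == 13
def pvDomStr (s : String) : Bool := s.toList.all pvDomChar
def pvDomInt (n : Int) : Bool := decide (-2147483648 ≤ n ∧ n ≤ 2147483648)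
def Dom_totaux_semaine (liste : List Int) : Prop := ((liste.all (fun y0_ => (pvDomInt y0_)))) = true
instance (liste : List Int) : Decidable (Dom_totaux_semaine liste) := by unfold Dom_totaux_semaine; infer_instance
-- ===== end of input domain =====

-- B replaces A's running accumulator with mod-7 reset by a comprehension summing each full 7-element slice (objective: simpler).

-- ===== PORT A =====
-- loop body of A: add the current element to the running total; on i % 7 == 6 append and reset
def totauxStep (st : List Int × Int) (p : Int × Int) : List Int × Int :=
  let total := st.2 + p.2
  if PySem.Int.mod p.1 7 == 6 then (st.1 ++ [total], 0) else (st.1, total)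

def totaux_semaine (liste : List Int) : List Int :=
  ((PySem.List.enumerate liste 0).foldl totauxStep ([], 0)).1

-- ===== PORT B =====
def totaux_semaine_alt (liste : List Int) : List Int :=
  (PySem.List.pyRange 0 (PySem.Int.floordiv (liste.length : Int) 7) 1).map
    (fun w => (PySem.List.slice liste (some (7 * w)) (some (7 * w + 7))).sum)

-- ===== PRECONDITION & SPEC =====
def Spec_totaux_semaine (liste : List Int) (out : List Int) : Prop := out = totaux_semaine_alt liste
instance (liste : List Int) (out : List Int) : Decidable (Spec_totaux_semaine liste out) := by unfold Spec_totaux_semaine; infer_instance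

-- ===== CLAIM (what is proved, stated in full; the proofs are below) =====
def Claim_equal_totaux_semaine : Prop := ∀ (liste : List Int), Dom_totaux_semaine liste → Spec_totaux_semaine liste (totaux_semaine liste)

-- ===== LEMMAS AND PROOFS =====

-- common normal form: the list of sums of the complete 7-element chunks
def chunks (xs : List Int) : List Int :=
  if _h : 7 ≤ xs.length then ((xs.take 7).sum) :: chunks (xs.drop 7) else []
  termination_by xs.length
  decreasing_by simp; omega

-- A's loop appends nothing while no index hits 6 mod 7
theorem foldl_no_hit (xs : List Int) (s : Int) (acc : List Int) (t : Int)
    (h : ∀ i : Int, s ≤ i → i < s + xs.length → PySem.Int.mod i 7 ≠ 6) :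
    ((PySem.List.enumerate xs s).foldl totauxStep (acc, t)).1 = acc := by
  induction xs generalizing s t with
  | nil => simp [PySem.List.enumerate_nil]
  | cons x xs ih =>
    rw [PySem.List.enumerate_cons]
    simp only [List.foldl_cons, totauxStep]
    have hs : PySem.Int.mod s 7 ≠ 6 := h s le_rfl (by simp)
    simp only [beq_iff_eq, if_neg hs]
    exact ih (s + 1) _ (fun i h1 h2 => h i (by omega) (by simp [List.length_cons] at h2 ⊢; omega))

-- one full week of A's loop: sum the seven elements, append, reset the total
theorem seven_steps (m : Nat) (acc : List Int) (a b c d e f g : Int) :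
    (PySem.List.enumerate [a, b, c, d, e, f, g] (7 * (m : Int))).foldl totauxStep (acc, 0)
      = (acc ++ [0 + a + b + c + d + e + f + g], 0) := by
  have e7 : ∀ j : Int, PySem.Int.mod j 7 = j % 7 :=
    fun j => PySem.Int.mod_eq_emod_of_pos (by norm_num)
  simp only [PySem.List.enumerate_cons, PySem.List.enumerate_nil, List.foldl_cons,
    List.foldl_nil, totauxStep, e7, beq_iff_eq]
  have h0 : ¬ (7 * (m : Int)) % 7 = 6 := by omega
  have h1 : ¬ (7 * (m : Int) + 1) % 7 = 6 := by omega
  have h2 : ¬ (7 * (m : Int) + 1 + 1) % 7 = 6 := by omega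
  have h3 : ¬ (7 * (m : Int) + 1 + 1 + 1) % 7 = 6 := by omega
  have h4 : ¬ (7 * (m : Int) + 1 + 1 + 1 + 1) % 7 = 6 := by omega
  have h5 : ¬ (7 * (m : Int) + 1 + 1 + 1 + 1 + 1) % 7 = 6 := by omega
  have h6 : (7 * (m : Int) + 1 + 1 + 1 + 1 + 1 + 1) % 7 = 6 := by omega
  simp [h2, h3, h4, h5, h6]

theorem loop_inv (n : Nat) (xs : List Int) (hn : xs.length ≤ n) (m : Nat) (acc : List Int) :
    ((PySem.List.enumerate xs (7 * (m : Int))).foldl totauxStep (acc, 0)).1 = acc ++ chunks xs := by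
  induction n generalizing xs m acc with
  | zero =>
    have hx : xs = [] := List.eq_nil_of_length_eq_zero (by omega)
    subst hx
    simp [PySem.List.enumerate_nil, chunks]
  | succ n ih =>
    by_cases h7 : 7 ≤ xs.length
    · match xs, h7 with
      | a :: b :: c :: d :: e :: f :: g :: rest, _ =>
        have hsplit : a :: b :: c :: d :: e :: f :: g :: rest
            = [a, b, c, d, e, f, g] ++ rest := by simp
        rw [hsplit, PySem.List.enumerate_append, List.foldl_append, seven_steps]
        have hidx : (7 * (m : Int)) + ([a, b, c, d, e, f, g] : List Int).length
            = 7 * ((m + 1 : Nat) : Int) := by simp; ring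
        rw [hidx, ih rest (by simp at hn ⊢; omega) (m + 1)]
        have hch : chunks ([a, b, c, d, e, f, g] ++ rest)
            = (a + b + c + d + e + f + g) :: chunks rest := by
          rw [chunks, dif_pos (by simp)]
          simp
          ring
        rw [hch]
        simp
    · rw [chunks, dif_neg h7, List.append_nil]
      refine foldl_no_hit xs _ acc 0 (fun i h1 h2 => ?_)
      rw [PySem.Int.mod_eq_emod_of_pos (by norm_num)]
      omega

theorem chunks_eq_range (n : Nat) (xs : List Int) (hn : xs.length ≤ n) :
    chunks xs = (List.range (xs.length / 7)).map (fun k => ((xs.drop (7 * k)).take 7).sum) := by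
  induction n generalizing xs with
  | zero =>
    have hx : xs = [] := List.eq_nil_of_length_eq_zero (by omega)
    subst hx; simp [chunks]
  | succ n ih =>
    by_cases h7 : 7 ≤ xs.length
    · rw [chunks, dif_pos h7]
      have hlen : xs.length / 7 = (xs.drop 7).length / 7 + 1 := by
        simp; omega
      rw [hlen, List.range_succ_eq_map, List.map_cons, List.map_map,
        ih (xs.drop 7) (by simp; omega)]
      congr 1
      apply List.map_congr_left
      intro k _
      simp only [Function.comp_apply, List.drop_drop, Nat.succ_eq_add_one]
      have h1 : 7 + 7 * k = 7 * (k + 1) := by ring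
      rw [h1]
    · rw [chunks, dif_neg h7]
      have h0 : xs.length / 7 = 0 := by omega
      simp [h0]

theorem alt_eq_chunks (xs : List Int) : totaux_semaine_alt xs = chunks xs := by
  rw [chunks_eq_range xs.length xs le_rfl]
  unfold totaux_semaine_alt
  rw [PySem.Int.floordiv_eq_ediv_of_pos (by norm_num), PySem.List.pyRange_one]
  simp only [sub_zero, List.map_map]
  have hn : ((xs.length : Int) / 7).toNat = xs.length / 7 := by omega
  rw [hn]
  apply List.map_congr_left
  intro k _
  simp only [Function.comp_apply, zero_add]
  have hs : PySem.List.slice xs (some (7 * (k : Int))) (some (7 * (k : Int) + 7)) =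
      (xs.drop (7 * k)).take 7 := by
    have h := PySem.List.slice_natCast_add xs (7 * k) 7
    push_cast at h ⊢
    exact h
  rw [hs]

-- ===== VERDICT (by name: the statement is the Claim_ definition above) =====
theorem totaux_semaine_spec : Claim_equal_totaux_semaine := by
  intro liste _
  unfold Spec_totaux_semaine
  rw [alt_eq_chunks]
  unfold totaux_semaine
  have h := loop_inv liste.length liste le_rfl 0 []
  simpa using h
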